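-- pv_equiv track=rewrite | github.com/daniel-reich/ubiquitous-fiesta | 8NyNftbNXd6CZCDXf_22.py | get_coin_balances
-- ===== SOURCE A (Python) =====
-- def get_coin_balances(lst1, lst2):
--   a, b, = 3, 3
--
--   for i in lst1:
--     if i == 'share':
--       a -= 1
--       b += 3
--
--   for i in lst2:
--     if i == 'share':
--       b -= 1
--       a += 3
--
--   return [a,b]
-- ===== SOURCE B (Python) =====
-- def get_coin_balances(lst1, lst2):
--   def deltas(lst, da, db):
--     # total (a,b) contribution of lst, where each 'share' contributes (da, db),
--     # computed by divide-and-conquer over halves of the list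
--     if not lst:
--       return (0, 0)
--     if len(lst) == 1:
--       return (da, db) if lst[0] == 'share' else (0, 0)
--     mid = len(lst) // 2
--     xa, xb = deltas(lst[:mid], da, db)
--     ya, yb = deltas(lst[mid:], da, db)
--     return (xa + ya, xb + yb)
--   a1, b1 = deltas(lst1, -1, 3)
--   a2, b2 = deltas(lst2, 3, -1)
--   return [3 + a1 + a2, 3 + b1 + b2]
-- ===== Notes on version B (the rewrite author's own statement) =====
-- stated objective: alternative
-- what changed: Replaces A's linear left-to-right accumulation (per-element counter updates to a shared (a,b) state) with a divide-and-conquer recursion that computes each list's (a,b) delta contribution by splitting the list in halves and summing the two sub-results, then combines the two delta pairs with the initial balances.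
import Mathlib
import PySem

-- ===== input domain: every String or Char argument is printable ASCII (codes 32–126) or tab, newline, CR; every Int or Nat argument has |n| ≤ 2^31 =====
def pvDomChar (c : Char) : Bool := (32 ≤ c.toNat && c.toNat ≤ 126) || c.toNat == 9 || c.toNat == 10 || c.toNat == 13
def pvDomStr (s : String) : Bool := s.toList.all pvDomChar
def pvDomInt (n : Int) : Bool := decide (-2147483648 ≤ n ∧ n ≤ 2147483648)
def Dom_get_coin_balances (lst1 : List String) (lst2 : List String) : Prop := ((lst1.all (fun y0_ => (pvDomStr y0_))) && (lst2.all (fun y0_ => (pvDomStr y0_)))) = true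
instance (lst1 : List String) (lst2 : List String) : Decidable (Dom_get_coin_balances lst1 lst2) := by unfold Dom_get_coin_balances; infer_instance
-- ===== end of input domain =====

-- B replaces A's linear accumulation over a shared (a,b) state with a divide-and-conquer
-- recursion summing half-list delta contributions (objective: alternative decomposition).

-- ===== PORT A =====
def get_coin_balances (lst1 : List String) (lst2 : List String) : List Int :=
  let ab := lst1.foldl (fun (ab : Int × Int) i =>
    if i == "share" then (ab.1 - 1, ab.2 + 3) else ab) (3, 3)
  let ab := lst2.foldl (fun (ab : Int × Int) i =>
    if i == "share" then (ab.1 + 3, ab.2 - 1) else ab) ab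
  [ab.1, ab.2]

-- ===== PORT B =====
-- divide-and-conquer helper: (a,b) delta contribution of lst, each "share" adding (da, db)
def pvDeltas (lst : List String) (da db : Int) : Int × Int :=
  if h0 : lst = [] then (0, 0)
  else if h1 : lst.length = 1 then
    (if lst.headD "" == "share" then (da, db) else (0, 0))
  else
    let mid := lst.length / 2
    let x := pvDeltas (lst.take mid) da db
    let y := pvDeltas (lst.drop mid) da db
    (x.1 + y.1, x.2 + y.2)
termination_by lst.length
decreasing_by
  all_goals
    have hlen : lst.length ≠ 0 := fun h => h0 (List.eq_nil_of_length_eq_zero h)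
    simp only [List.length_take, List.length_drop]
    omega

def get_coin_balances_alt (lst1 : List String) (lst2 : List String) : List Int :=
  let d1 := pvDeltas lst1 (-1) 3
  let d2 := pvDeltas lst2 3 (-1)
  [3 + d1.1 + d2.1, 3 + d1.2 + d2.2]

-- ===== PRECONDITION & SPEC =====
def Spec_get_coin_balances (lst1 : List String) (lst2 : List String) (out : List Int) : Prop := out = get_coin_balances_alt lst1 lst2
instance (lst1 : List String) (lst2 : List String) (out : List Int) : Decidable (Spec_get_coin_balances lst1 lst2 out) := by unfold Spec_get_coin_balances; infer_instance

-- ===== CLAIM (what is proved, stated in full; the proofs are below) =====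
def Claim_equal_get_coin_balances : Prop := ∀ (lst1 : List String) (lst2 : List String), Dom_get_coin_balances lst1 lst2 → Spec_get_coin_balances lst1 lst2 (get_coin_balances lst1 lst2)

-- ===== LEMMAS AND PROOFS =====

theorem pvDeltas_eq (lst : List String) (da db : Int) :
    pvDeltas lst da db = (da * lst.count "share", db * lst.count "share") := by
  fun_induction pvDeltas lst da db with
  | case1 => simp
  | case2 l h0 h1 heq =>
      match l, h1, heq with
      | [a], _, heq =>
          have ha : a = "share" := by simpa using heq
          simp [ha]
  | case3 l h0 h1 heq =>
      match l, h1, heq with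
      | [a], _, heq =>
          have ha : ¬ a = "share" := by simpa using heq
          simp [ha]
  | case4 l h0 h1 mid x y ih2 ih1 =>
      have hc : (l.take mid).count "share" + (l.drop mid).count "share"
          = l.count "share" := by
        conv_rhs => rw [← List.take_append_drop mid l]
        rw [List.count_append]
      simp only [x, y, ih1, ih2, Prod.ext_iff]
      constructor <;> · push_cast [← hc]; ring

theorem fold1_count (lst : List String) (a b : Int) :
    lst.foldl (fun (ab : Int × Int) i =>
      if i == "share" then (ab.1 - 1, ab.2 + 3) else ab) (a, b)
    = (a - lst.count "share", b + 3 * lst.count "share") := by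
  induction lst generalizing a b with
  | nil => simp
  | cons h t ih =>
      rw [List.foldl_cons]
      by_cases hh : h = "share"
      · rw [if_pos ((beq_iff_eq).mpr hh), ih]
        simp [hh, Prod.ext_iff]
        push_cast
        constructor <;> ring
      · rw [if_neg (by simp [hh]), ih]
        simp [hh]

theorem fold2_count (lst : List String) (a b : Int) :
    lst.foldl (fun (ab : Int × Int) i =>
      if i == "share" then (ab.1 + 3, ab.2 - 1) else ab) (a, b)
    = (a + 3 * lst.count "share", b - lst.count "share") := by
  induction lst generalizing a b with
  | nil => simp
  | cons h t ih =>
      rw [List.foldl_cons]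
      by_cases hh : h = "share"
      · rw [if_pos ((beq_iff_eq).mpr hh), ih]
        simp [hh, Prod.ext_iff]
        push_cast
        constructor <;> ring
      · rw [if_neg (by simp [hh]), ih]
        simp [hh]

-- ===== VERDICT (by name: the statement is the Claim_ definition above) =====
theorem get_coin_balances_spec : Claim_equal_get_coin_balances := by
  intro lst1 lst2 _
  unfold Spec_get_coin_balances get_coin_balances get_coin_balances_alt
  simp only [fold1_count, fold2_count, pvDeltas_eq, List.cons.injEq, and_true]
  constructor <;> ring
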